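-- pv_equiv track=rewrite | github.com/jbousquin/test_travis | H2O/getWQP.py | characteristicName
-- ===== SOURCE A (Python) =====
-- def characteristicName(c):
--     """ Notes:
--     'oxygen' characteristic (NWIS/STORET) is actually dissolved oxygen
--     'Temperature' characteristic is void of data (left in just in case)
--     'pH' (STEWARDS ) is also without data (left in just in case)
--
--     """
--     #pretest values to be no spaces and lowercase
--     #            'Nitrate-Nitrogen': ['nitrate-nitrogen', 'nitrogen-nitrate',
--     #                             'nitrogen-all',],
--     #        'Nitrogen': ['nitrogen'],
--     #        'Nitrogen-15': ['nitrogen-15', 'nitrogen-all',],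
--     #        'Nitrogen ion': ['nitrogenion', 'nitrogen-all',],
--     c = c.replace(" ", "")
--     c = c.replace("'", "")
--     c = c.lower()
--     cDict = {'Depth': ['depth',],
--              'Salinity': ['salinity',],
--              'Temperature, water' : ['tempreature',],
--              'Temperature': ['temperature',],
--              'Turbidity': ['turbidity', 'clarity-all',],
--              'Total suspended solids': ['totalsuspendedsolids', 'clarity-all',],
--              'Total Suspended Particulate Matter':['clarity-all',],
--              'Secchi depth': ['secchi-all', 'clarity-all', 'sechidepth',],
--              'Horizontal Secchi Disk': ['horizontalsecchidisk',
--                                         'secchi-all', 'clarity-all',],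
--              'Depth, Secchi disk depth': ['depth,secchidiskdepth',
--                                           'secchi-all', 'clarity-all',],
--              'Secchi, Horizontal Distance': ['secchi,horizontaldistance',
--                                              'secchi-all', 'clarity-all',],
--              'Water transparency, Secchi disc': ['watertransparency,secchidisc',
--                                                  'secchi-all', 'clarity-all',],
--              'Transparency, Secchi tube with disk': ['transparency,secchitubewithdisk',
--                                                      'secchi-all', 'clarity-all',],
--              'Depth, Secchi disk depth (choice list)': ['depth,secchidiskdepth(choicelist)',
--                                                         'secchi-all', 'clarity-all',],
--              'Secchi Reading Condition (choice list)': ['secchireadingcondition(choicelist)',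
--                                                         'secchi-all', 'clarity-all',],
--              'pH': ['ph',],
--              'PH': ['ph',],
--              'Oxygen': ['dissolvedoxygen-all', 'oxygen'],
--              'Dissolved Oxygen': ['dissolvedoxygen-all', 'dissolvedoxygen'],
--              'Dissolved oxygen': ['dissolvedoxygen-all', 'dissolvedoxygen'],
--              'Dissolved oxygen (DO)': ['dissolvedoxygen-all',
--                                        'dissolvedoxygen(do)',],
--              'Dissolved oxygen saturation': ['dissolvedoxygen-all',
--                                              'dissolvedoxygensaturation',],
--              'Ammonia-nitrogen': ['ammonia-nitrogen', 'nitrogen-ammonia',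
--                                   'nitrogen-all',],
--              'Organic Nitrogen': ['organicnitrogen', 'nitrogen-all',],
--              'Chlorophyll a, uncorrected for pheophytin': ['chlorophylla',
--                                                            'chlorophyll-all',],
--             }
--     cList = [i[0] for i in cDict.items() if c in i[1]]
--     return {'characteristicName': cList}
-- ===== SOURCE B (Python) =====
-- # Precomputed inverted lookup table: normalized alias -> canonical characteristic
-- # names, in the original table's key order.  One dict lookup per call replaces
-- # A's per-call scan over every (key, aliases) entry.
-- _ALIASES = {
--     'depth': ['Depth'],
--     'salinity': ['Salinity'],
--     'tempreature': ['Temperature, water'],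
--     'temperature': ['Temperature'],
--     'turbidity': ['Turbidity'],
--     'clarity-all': ['Turbidity', 'Total suspended solids',
--                     'Total Suspended Particulate Matter', 'Secchi depth',
--                     'Horizontal Secchi Disk', 'Depth, Secchi disk depth',
--                     'Secchi, Horizontal Distance',
--                     'Water transparency, Secchi disc',
--                     'Transparency, Secchi tube with disk',
--                     'Depth, Secchi disk depth (choice list)',
--                     'Secchi Reading Condition (choice list)'],
--     'totalsuspendedsolids': ['Total suspended solids'],
--     'secchi-all': ['Secchi depth', 'Horizontal Secchi Disk',
--                    'Depth, Secchi disk depth', 'Secchi, Horizontal Distance',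
--                    'Water transparency, Secchi disc',
--                    'Transparency, Secchi tube with disk',
--                    'Depth, Secchi disk depth (choice list)',
--                    'Secchi Reading Condition (choice list)'],
--     'sechidepth': ['Secchi depth'],
--     'horizontalsecchidisk': ['Horizontal Secchi Disk'],
--     'depth,secchidiskdepth': ['Depth, Secchi disk depth'],
--     'secchi,horizontaldistance': ['Secchi, Horizontal Distance'],
--     'watertransparency,secchidisc': ['Water transparency, Secchi disc'],
--     'transparency,secchitubewithdisk': ['Transparency, Secchi tube with disk'],
--     'depth,secchidiskdepth(choicelist)': ['Depth, Secchi disk depth (choice list)'],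
--     'secchireadingcondition(choicelist)': ['Secchi Reading Condition (choice list)'],
--     'ph': ['pH', 'PH'],
--     'dissolvedoxygen-all': ['Oxygen', 'Dissolved Oxygen', 'Dissolved oxygen',
--                             'Dissolved oxygen (DO)',
--                             'Dissolved oxygen saturation'],
--     'oxygen': ['Oxygen'],
--     'dissolvedoxygen': ['Dissolved Oxygen', 'Dissolved oxygen'],
--     'dissolvedoxygen(do)': ['Dissolved oxygen (DO)'],
--     'dissolvedoxygensaturation': ['Dissolved oxygen saturation'],
--     'ammonia-nitrogen': ['Ammonia-nitrogen'],
--     'nitrogen-ammonia': ['Ammonia-nitrogen'],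
--     'nitrogen-all': ['Ammonia-nitrogen', 'Organic Nitrogen'],
--     'organicnitrogen': ['Organic Nitrogen'],
--     'chlorophylla': ['Chlorophyll a, uncorrected for pheophytin'],
--     'chlorophyll-all': ['Chlorophyll a, uncorrected for pheophytin'],
-- }
--
--
-- def characteristicName(c):
--     key = c.replace(" ", "").replace("'", "").lower()
--     return {'characteristicName': _ALIASES.get(key, [])}
-- ===== Notes on version B (the rewrite author's own statement) =====
-- stated objective: idiomatic
-- what changed: Replaces the per-call scan over all 25 dict entries with membership tests in each alias list by a precomputed inverted table (normalized alias -> canonical names in original key order) and a single dict lookup per call.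
import Mathlib
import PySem

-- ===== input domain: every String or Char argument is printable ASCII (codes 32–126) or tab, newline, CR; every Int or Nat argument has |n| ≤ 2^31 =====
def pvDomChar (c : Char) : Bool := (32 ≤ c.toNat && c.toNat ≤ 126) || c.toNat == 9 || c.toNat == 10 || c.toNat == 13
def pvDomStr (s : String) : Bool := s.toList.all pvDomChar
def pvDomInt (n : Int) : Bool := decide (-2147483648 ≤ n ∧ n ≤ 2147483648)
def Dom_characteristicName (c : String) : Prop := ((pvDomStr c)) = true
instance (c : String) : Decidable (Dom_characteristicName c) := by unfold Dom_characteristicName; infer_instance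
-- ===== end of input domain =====

-- B replaces A's per-call scan-and-filter over the whole key→aliases table by a
-- precomputed inverted table (normalized alias → canonical names) and one dict lookup (objective: idiomatic).

-- ===== PORT A =====
-- the literal cDict from A's source
def pvTable : List (String × List String) :=
  [("Depth", ["depth"]),
   ("Salinity", ["salinity"]),
   ("Temperature, water", ["tempreature"]),
   ("Temperature", ["temperature"]),
   ("Turbidity", ["turbidity", "clarity-all"]),
   ("Total suspended solids", ["totalsuspendedsolids", "clarity-all"]),
   ("Total Suspended Particulate Matter", ["clarity-all"]),
   ("Secchi depth", ["secchi-all", "clarity-all", "sechidepth"]),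
   ("Horizontal Secchi Disk", ["horizontalsecchidisk", "secchi-all", "clarity-all"]),
   ("Depth, Secchi disk depth", ["depth,secchidiskdepth", "secchi-all", "clarity-all"]),
   ("Secchi, Horizontal Distance", ["secchi,horizontaldistance", "secchi-all", "clarity-all"]),
   ("Water transparency, Secchi disc", ["watertransparency,secchidisc", "secchi-all", "clarity-all"]),
   ("Transparency, Secchi tube with disk", ["transparency,secchitubewithdisk", "secchi-all", "clarity-all"]),
   ("Depth, Secchi disk depth (choice list)", ["depth,secchidiskdepth(choicelist)", "secchi-all", "clarity-all"]),
   ("Secchi Reading Condition (choice list)", ["secchireadingcondition(choicelist)", "secchi-all", "clarity-all"]),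
   ("pH", ["ph"]),
   ("PH", ["ph"]),
   ("Oxygen", ["dissolvedoxygen-all", "oxygen"]),
   ("Dissolved Oxygen", ["dissolvedoxygen-all", "dissolvedoxygen"]),
   ("Dissolved oxygen", ["dissolvedoxygen-all", "dissolvedoxygen"]),
   ("Dissolved oxygen (DO)", ["dissolvedoxygen-all", "dissolvedoxygen(do)"]),
   ("Dissolved oxygen saturation", ["dissolvedoxygen-all", "dissolvedoxygensaturation"]),
   ("Ammonia-nitrogen", ["ammonia-nitrogen", "nitrogen-ammonia", "nitrogen-all"]),
   ("Organic Nitrogen", ["organicnitrogen", "nitrogen-all"]),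
   ("Chlorophyll a, uncorrected for pheophytin", ["chlorophylla", "chlorophyll-all"])]

def characteristicName (c : String) : List (String × List String) :=
  let c1 := PySem.Str.replace c " " ""
  let c2 := PySem.Str.replace c1 "'" ""
  let c3 := PySem.Str.lower c2
  let cDict : PySem.Dict String (List String) := PySem.Dict.ofList pvTable
  let cList := (cDict.items.filter (fun i => decide (c3 ∈ i.2))).map (fun i => i.1)
  [("characteristicName", cList)]

-- ===== PORT B =====
-- _ALIASES from Source B: the precomputed inverted table, a literal dict
def pvAliases : PySem.Dict String (List String) :=
  PySem.Dict.ofList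
    [("depth", ["Depth"]),
     ("salinity", ["Salinity"]),
     ("tempreature", ["Temperature, water"]),
     ("temperature", ["Temperature"]),
     ("turbidity", ["Turbidity"]),
     ("clarity-all", ["Turbidity", "Total suspended solids",
                      "Total Suspended Particulate Matter", "Secchi depth",
                      "Horizontal Secchi Disk", "Depth, Secchi disk depth",
                      "Secchi, Horizontal Distance",
                      "Water transparency, Secchi disc",
                      "Transparency, Secchi tube with disk",
                      "Depth, Secchi disk depth (choice list)",
                      "Secchi Reading Condition (choice list)"]),
     ("totalsuspendedsolids", ["Total suspended solids"]),
     ("secchi-all", ["Secchi depth", "Horizontal Secchi Disk",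
                     "Depth, Secchi disk depth", "Secchi, Horizontal Distance",
                     "Water transparency, Secchi disc",
                     "Transparency, Secchi tube with disk",
                     "Depth, Secchi disk depth (choice list)",
                     "Secchi Reading Condition (choice list)"]),
     ("sechidepth", ["Secchi depth"]),
     ("horizontalsecchidisk", ["Horizontal Secchi Disk"]),
     ("depth,secchidiskdepth", ["Depth, Secchi disk depth"]),
     ("secchi,horizontaldistance", ["Secchi, Horizontal Distance"]),
     ("watertransparency,secchidisc", ["Water transparency, Secchi disc"]),
     ("transparency,secchitubewithdisk", ["Transparency, Secchi tube with disk"]),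
     ("depth,secchidiskdepth(choicelist)", ["Depth, Secchi disk depth (choice list)"]),
     ("secchireadingcondition(choicelist)", ["Secchi Reading Condition (choice list)"]),
     ("ph", ["pH", "PH"]),
     ("dissolvedoxygen-all", ["Oxygen", "Dissolved Oxygen", "Dissolved oxygen",
                              "Dissolved oxygen (DO)",
                              "Dissolved oxygen saturation"]),
     ("oxygen", ["Oxygen"]),
     ("dissolvedoxygen", ["Dissolved Oxygen", "Dissolved oxygen"]),
     ("dissolvedoxygen(do)", ["Dissolved oxygen (DO)"]),
     ("dissolvedoxygensaturation", ["Dissolved oxygen saturation"]),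
     ("ammonia-nitrogen", ["Ammonia-nitrogen"]),
     ("nitrogen-ammonia", ["Ammonia-nitrogen"]),
     ("nitrogen-all", ["Ammonia-nitrogen", "Organic Nitrogen"]),
     ("organicnitrogen", ["Organic Nitrogen"]),
     ("chlorophylla", ["Chlorophyll a, uncorrected for pheophytin"]),
     ("chlorophyll-all", ["Chlorophyll a, uncorrected for pheophytin"])]

def characteristicName_alt (c : String) : List (String × List String) :=
  let key := PySem.Str.lower (PySem.Str.replace (PySem.Str.replace c " " "") "'" "")
  [("characteristicName", pvAliases.getD key [])]

-- ===== PRECONDITION & SPEC =====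
def Spec_characteristicName (c : String) (out : List (String × List String)) : Prop := out = characteristicName_alt c
instance (c : String) (out : List (String × List String)) : Decidable (Spec_characteristicName c out) := by unfold Spec_characteristicName; infer_instance

-- ===== CLAIM (what is proved, stated in full; the proofs are below) =====
def Claim_equal_characteristicName : Prop := ∀ (c : String), Dom_characteristicName c → Spec_characteristicName c (characteristicName c)

-- ===== LEMMAS AND PROOFS =====

-- the inverted flat pair list, filtered at a key, recovers A's scan of the table
lemma pv_outer (c : String) (tbl : List (String × List String))
    (h : ∀ p ∈ tbl, p.2.Nodup) :
    ((tbl.flatMap (fun p => p.2.map (fun v => (v, p.1)))).filter (fun q => q.1 == c)).map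
        (fun q => q.2)
      = (tbl.filter (fun p => decide (c ∈ p.2))).map (fun p => p.1) := by
  induction tbl with
  | nil => simp
  | cons p tbl ih =>
    have hp : p.2.Nodup := h p (by simp)
    have ih' := ih (fun q hq => h q (by simp [hq]))
    simp only [List.flatMap_cons, List.filter_append, List.map_append, List.filter_cons, ih']
    have hhead : ((p.2.map (fun v => (v, p.1))).filter (fun q => q.1 == c)).map (fun q => q.2)
        = if c ∈ p.2 then [p.1] else [] := by
      rw [List.filter_map]
      simp only [Function.comp_def]
      have : (fun v => (v, p.1).1 == c) = (fun v => v == c) := rfl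
      rw [this, List.filter_beq, List.map_map]
      by_cases hc : c ∈ p.2
      · rw [List.count_eq_one_of_mem hp hc]; simp [hc]
      · rw [List.count_eq_zero_of_not_mem hc]; simp [hc]
    rw [hhead]
    by_cases hc : c ∈ p.2 <;> simp [hc]

lemma pv_items_ofList : (PySem.Dict.ofList pvTable).items = pvTable := by decide

lemma pv_nodup : ∀ p ∈ pvTable, p.2.Nodup := by decide

-- B's literal inverted dict IS the setdefault/append fold over A's table
lemma pv_aliases_eq_fold :
    pvAliases
      = pvTable.foldl (fun d p => p.2.foldl (fun d v => d.modify v [] (· ++ [p.1])) d)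
          PySem.Dict.empty := by
  set_option maxRecDepth 4096 in decide

lemma pv_aliases_getD (c : String) :
    pvAliases.getD c [] = (pvTable.filter (fun p => decide (c ∈ p.2))).map (fun p => p.1) := by
  have hfold : pvAliases
      = (pvTable.flatMap (fun p => p.2.map (fun v => (v, p.1)))).foldl
          (fun d q => d.modify q.1 [] (· ++ [q.2])) PySem.Dict.empty := by
    rw [pv_aliases_eq_fold, List.foldl_flatMap]
    congr 1
    funext d p
    rw [List.foldl_map]
  rw [hfold, PySem.Dict.getD_foldl_modify_append, PySem.Dict.getD_empty, List.nil_append]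
  exact pv_outer c pvTable pv_nodup

-- ===== VERDICT (by name: the statement is the Claim_ definition above) =====
theorem characteristicName_spec : Claim_equal_characteristicName := by
  intro c _
  unfold Spec_characteristicName characteristicName characteristicName_alt
  simp only [pv_items_ofList, pv_aliases_getD]
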